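-- pv_equiv track=rewrite | github.com/y9ee3257/Interview_Prep | script_to_add_dsa_problem.py | find_section_ranges
-- ===== SOURCE A (Python) =====
-- from typing import List, Tuple, Optional
--
-- def find_section_ranges(lines: List[str]) -> List[Tuple[str, int, int]]:
--     """
--     Find all '### Section' ranges.
--     Return list of tuples: (section_name, start_index, end_index_exclusive)
--     end_index_exclusive is index of next section header or len(lines)
--     """
--     headers = []
--     for i, line in enumerate(lines):
--         stripped = line.strip()
--         if stripped.startswith("### "):
--             section = stripped[4:].strip()
--             headers.append((section, i))
--     ranges = []
--     for idx, (name, start) in enumerate(headers):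
--         end = headers[idx + 1][1] if idx + 1 < len(headers) else len(lines)
--         ranges.append((name, start, end))
--     return ranges
-- ===== SOURCE B (Python) =====
-- from typing import List, Tuple
--
-- def find_section_ranges(lines: List[str]) -> List[Tuple[str, int, int]]:
--     ranges = []
--     pending = None  # (name, start) of the section whose end we have not seen yet
--     for i, line in enumerate(lines):
--         stripped = line.strip()
--         if stripped.startswith("### "):
--             if pending is not None:
--                 ranges.append((pending[0], pending[1], i))
--             pending = (stripped[4:].strip(), i)
--     if pending is not None:
--         ranges.append((pending[0], pending[1], len(lines)))
--     return ranges
-- ===== Notes on version B (the rewrite author's own statement) =====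
-- stated objective: simpler
-- what changed: Replaces A's two passes (collect all headers into a list, then pair each header with the next by index lookup) with a single streaming pass that keeps only the pending header and emits each range when the next header or the end of input is reached.
import Mathlib
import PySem

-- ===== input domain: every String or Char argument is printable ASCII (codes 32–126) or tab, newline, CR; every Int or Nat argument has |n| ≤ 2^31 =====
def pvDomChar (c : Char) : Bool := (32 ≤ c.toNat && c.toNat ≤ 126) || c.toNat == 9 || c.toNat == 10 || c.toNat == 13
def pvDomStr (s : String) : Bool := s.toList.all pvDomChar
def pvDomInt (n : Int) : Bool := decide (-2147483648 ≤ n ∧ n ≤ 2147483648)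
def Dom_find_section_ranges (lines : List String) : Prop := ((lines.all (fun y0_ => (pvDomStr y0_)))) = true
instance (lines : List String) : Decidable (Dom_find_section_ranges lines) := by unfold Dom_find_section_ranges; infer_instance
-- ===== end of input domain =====

-- B replaces A's two passes (collect all headers, then pair each with the next by index
-- lookup) with one streaming pass that keeps only the pending header; objective: simpler.

-- ===== PORT A =====
def find_section_ranges (lines : List String) : List (String × Int × Int) :=
  let headers : List (String × Int) :=
    (PySem.List.enumerate lines).foldl (fun acc p =>
      if PySem.Str.startswith (PySem.Str.strip p.2) "### " then
        acc ++ [(PySem.Str.strip (PySem.Str.slice (PySem.Str.strip p.2) (some 4) none), p.1)]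
      else acc) []
  (PySem.List.enumerate headers).foldl (fun ranges q =>
    ranges ++ [(q.2.1, q.2.2,
      if q.1 + 1 < (headers.length : Int) then (PySem.List.pyGetD headers (q.1 + 1) ("", 0)).2
      else (lines.length : Int))]) []

-- ===== PORT B =====
def find_section_ranges_alt (lines : List String) : List (String × Int × Int) :=
  let st : List (String × Int × Int) × Option (String × Int) :=
    (PySem.List.enumerate lines).foldl (fun st p =>
      if PySem.Str.startswith (PySem.Str.strip p.2) "### " then
        ((match st.2 with
          | some pend => st.1 ++ [(pend.1, pend.2, p.1)]
          | none => st.1),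
         some (PySem.Str.strip (PySem.Str.slice (PySem.Str.strip p.2) (some 4) none), p.1))
      else st) ([], none)
  match st.2 with
  | some pend => st.1 ++ [(pend.1, pend.2, (lines.length : Int))]
  | none => st.1

-- ===== PRECONDITION & SPEC =====
def Spec_find_section_ranges (lines : List String) (out : List (String × Int × Int)) : Prop := out = find_section_ranges_alt lines
instance (lines : List String) (out : List (String × Int × Int)) : Decidable (Spec_find_section_ranges lines out) := by unfold Spec_find_section_ranges; infer_instance

-- ===== CLAIM (what is proved, stated in full; the proofs are below) =====
def Claim_equal_find_section_ranges : Prop := ∀ (lines : List String), Dom_find_section_ranges lines → Spec_find_section_ranges lines (find_section_ranges lines)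

-- ===== LEMMAS AND PROOFS =====

-- the per-line header test and extracted value (shared by both Pythons' line handling)
def pvP (p : Int × String) : Bool := PySem.Str.startswith (PySem.Str.strip p.2) "### "
def pvG (p : Int × String) : String × Int :=
  (PySem.Str.strip (PySem.Str.slice (PySem.Str.strip p.2) (some 4) none), p.1)

-- reference chaining of a header list: each start paired with the next start, last with n
def chain (hs : List (String × Int)) (n : Int) : List (String × Int × Int) :=
  match hs with
  | [] => []
  | [(a, s)] => [(a, s, n)]
  | (a, s) :: (b, t) :: r => (a, s, t) :: chain ((b, t) :: r) n

-- B's loop skips non-header lines, so it equals folding its header action over the headers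
def bstep2 (st : List (String × Int × Int) × Option (String × Int)) (h : String × Int) :
    List (String × Int × Int) × Option (String × Int) :=
  ((match st.2 with
    | some pend => st.1 ++ [(pend.1, pend.2, h.2)]
    | none => st.1), some h)

lemma b_fold_filter_aux (l : List (Int × String))
    (st : List (String × Int × Int) × Option (String × Int)) :
    l.foldl (fun st p =>
      if pvP p then
        ((match st.2 with
          | some pend => st.1 ++ [(pend.1, pend.2, p.1)]
          | none => st.1), some (pvG p))
      else st) st
    = ((l.filter pvP).map pvG).foldl bstep2 st := by
  induction l generalizing st with
  | nil => rfl
  | cons x xs ih =>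
    rw [List.foldl_cons, List.filter_cons]
    by_cases h : pvP x = true
    · rw [if_pos h, if_pos h, List.map_cons, List.foldl_cons, ← ih]
      congr 1
    · rw [if_neg h, if_neg h]
      exact ih st

lemma b_fold_filter (l : List (Int × String))
    (st : List (String × Int × Int) × Option (String × Int)) :
    l.foldl (fun st p =>
      if PySem.Str.startswith (PySem.Str.strip p.2) "### " then
        ((match st.2 with
          | some pend => st.1 ++ [(pend.1, pend.2, p.1)]
          | none => st.1),
         some (PySem.Str.strip (PySem.Str.slice (PySem.Str.strip p.2) (some 4) none), p.1))
      else st) st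
    = ((l.filter pvP).map pvG).foldl bstep2 st := by
  have := b_fold_filter_aux l st
  simpa [pvP, pvG] using this

lemma b_fold_chain (hs : List (String × Int)) (n : Int) :
    ∀ (acc : List (String × Int × Int)) (pend : Option (String × Int)),
    (match (hs.foldl bstep2 (acc, pend)).2 with
     | some p => (hs.foldl bstep2 (acc, pend)).1 ++ [(p.1, p.2, n)]
     | none => (hs.foldl bstep2 (acc, pend)).1)
    = acc ++ (match pend with
              | some p => chain (p :: hs) n
              | none => chain hs n) := by
  induction hs with
  | nil =>
    intro acc pend
    cases pend with
    | none => simp [chain]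
    | some p => simp [chain]
  | cons h t ih =>
    intro acc pend
    cases pend with
    | none =>
      simp only [List.foldl_cons, bstep2]
      rw [ih]
    | some p =>
      simp only [List.foldl_cons, bstep2]
      rw [ih]
      cases h with | mk b t' => cases p with | mk a s => simp [chain]
  
-- A's second loop, as a map over the enumerated header list
def pvF (hs : List (String × Int)) (n : Int) (q : Int × (String × Int)) : String × Int × Int :=
  (q.2.1, q.2.2,
    if q.1 + 1 < (hs.length : Int) then (PySem.List.pyGetD hs (q.1 + 1) ("", 0)).2 else n)

lemma a_map_chain (n : Int) (hs : List (String × Int)) :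
    ∀ (rest pre : List (String × Int)), hs = pre ++ rest →
    (PySem.List.enumerate rest (pre.length : Int)).map (pvF hs n) = chain rest n := by
  intro rest
  induction rest with
  | nil => intro pre h; simp [chain, PySem.List.enumerate]
  | cons x rs ih =>
    intro pre h
    cases x with
    | mk a s =>
      rw [PySem.List.enumerate_cons, List.map_cons]
      have hpre : (pre.length : Int) + 1 = (((pre ++ [(a, s)]).length : Nat) : Int) := by
        simp
      have htail : (PySem.List.enumerate rs ((pre.length : Int) + 1)).map (pvF hs n)
          = chain rs n := by
        rw [hpre]
        exact ih (pre ++ [(a, s)]) (by simpa using h)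
      cases rs with
      | nil =>
        have hlen : hs.length = pre.length + 1 := by subst h; simp
        simp [pvF, chain, hlen]
      | cons y rs' =>
        cases y with
        | mk b t =>
          have hcond : (pre.length : Int) + 1 < (hs.length : Int) := by
            subst h
            simp only [List.length_append, List.length_cons]
            push_cast
            omega
          have hget : PySem.List.pyGetD hs ((pre.length : Int) + 1) ("", 0) = (b, t) := by
            have : ((pre.length : Int) + 1) = ((pre.length + 1 : Nat) : Int) := by push_cast; ring
            rw [this, PySem.List.pyGetD_natCast]
            subst h
            rw [List.getD_eq_getElem?_getD, List.getElem?_append_right (by omega)]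
            simp
          rw [htail]
          simp [pvF, chain, hcond, hget]

lemma headers_eq (lines : List String) :
    (PySem.List.enumerate lines).foldl (fun acc p =>
      if PySem.Str.startswith (PySem.Str.strip p.2) "### " then
        acc ++ [(PySem.Str.strip (PySem.Str.slice (PySem.Str.strip p.2) (some 4) none), p.1)]
      else acc) []
    = ((PySem.List.enumerate lines).filter pvP).map pvG := by
  have := PySem.List.foldl_append_if pvP pvG (PySem.List.enumerate lines) []
  simpa [pvP, pvG] using this

-- ===== VERDICT (by name: the statement is the Claim_ definition above) =====
lemma a_second_fold (hs : List (String × Int)) (n : Int) :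
    List.foldl (fun ranges q =>
      ranges ++ [(q.2.1, q.2.2,
        if q.1 + 1 < (hs.length : Int) then (PySem.List.pyGetD hs (q.1 + 1) ("", 0)).2 else n)])
      [] (PySem.List.enumerate hs)
    = (PySem.List.enumerate hs).map (pvF hs n) := by
  have := PySem.List.foldl_append_singleton_eq_map (pvF hs n) (PySem.List.enumerate hs) []
  simpa [pvF] using this

theorem find_section_ranges_spec : Claim_equal_find_section_ranges := by
  intro lines _
  unfold Spec_find_section_ranges find_section_ranges find_section_ranges_alt
  simp only [headers_eq, b_fold_filter]
  rw [b_fold_chain, a_second_fold]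
  simpa using a_map_chain ((lines.length : Nat) : Int)
    (((PySem.List.enumerate lines).filter pvP).map pvG)
    (((PySem.List.enumerate lines).filter pvP).map pvG) [] (by simp)
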